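-- pv_equiv track=rewrite | github.com/alantao5056/USACO | contests/2018_december_bronze/the_bucket_list/theBucketList1.py | getMinBuckets
-- ===== SOURCE A (Python) =====
-- def getMinBuckets(cows: list) -> int:
--   cows = sorted(cows)
--   mostBuckets = 0
--   for i in range(1, 1000):
--     curBuckets = 0
--     for cow in cows:
--       if cow[0] <= i <= cow[1]:
--         curBuckets += cow[2]
--     if curBuckets > mostBuckets:
--       mostBuckets = curBuckets
--   return mostBuckets
-- ===== SOURCE B (Python) =====
-- def getMinBuckets(cows: list) -> int:
--   events = {}
--   for cow in cows:
--     lo = cow[0] if cow[0] > 1 else 1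
--     hi = cow[1] if cow[1] < 999 else 999
--     if lo <= hi:
--       events[lo] = events.get(lo, 0) + cow[2]
--       events[hi + 1] = events.get(hi + 1, 0) - cow[2]
--   mostBuckets = 0
--   cur = 0
--   for i in range(1, 1000):
--     cur += events.get(i, 0)
--     if cur > mostBuckets:
--       mostBuckets = cur
--   return mostBuckets
-- ===== Notes on version B (the rewrite author's own statement) =====
-- stated objective: faster
-- what changed: Replaces A's rescan of all cows for every time step 1..999 (after a pointless sort) by a difference dictionary of clamped interval events built in one pass over the cows, followed by a single prefix-sum sweep over 1..999 tracking the running maximum.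
-- outside the precondition, e.g. on getMinBuckets([(1001,)]): A returns 0, B raises IndexError
import Mathlib
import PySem

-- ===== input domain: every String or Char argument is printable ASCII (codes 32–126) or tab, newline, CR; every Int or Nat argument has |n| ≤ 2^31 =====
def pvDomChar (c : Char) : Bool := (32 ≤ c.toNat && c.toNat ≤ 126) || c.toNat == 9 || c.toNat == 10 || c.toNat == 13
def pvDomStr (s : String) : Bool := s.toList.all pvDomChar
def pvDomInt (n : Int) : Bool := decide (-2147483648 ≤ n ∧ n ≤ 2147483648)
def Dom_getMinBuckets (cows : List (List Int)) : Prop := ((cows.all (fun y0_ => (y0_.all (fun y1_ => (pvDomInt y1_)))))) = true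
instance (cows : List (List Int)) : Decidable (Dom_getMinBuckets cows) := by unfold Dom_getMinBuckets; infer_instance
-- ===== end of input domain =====

-- B replaces A's 999 × n rescans by a difference dictionary of interval events and one
-- prefix-sum sweep over 1..999 (objective: faster, O(n + T) instead of O(n · T)).

-- ===== PORT A =====
-- inner loop body: 'for cow in cows: if cow[0] <= i <= cow[1]: curBuckets += cow[2]'
def aInner (cows : List (List Int)) (i : Int) : Int :=
  cows.foldl (fun cur cow =>
    if PySem.List.pyGetD cow 0 0 ≤ i ∧ i ≤ PySem.List.pyGetD cow 1 0 then
      cur + PySem.List.pyGetD cow 2 0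
    else cur) 0

def getMinBuckets (cows : List (List Int)) : Int :=
  let cows' := PySem.List.sorted cows (fun x => x) false
  (PySem.List.pyRange 1 1000 1).foldl (fun mostBuckets i =>
    let curBuckets := aInner cows' i
    if curBuckets > mostBuckets then curBuckets else mostBuckets) 0

-- ===== PORT B =====
-- event-dictionary step: clamp the interval to [1, 999], add the weight at lo, subtract at hi+1
def bBuild (events : PySem.Dict Int Int) (cow : List Int) : PySem.Dict Int Int :=
  let lo := if PySem.List.pyGetD cow 0 0 > 1 then PySem.List.pyGetD cow 0 0 else 1
  let hi := if PySem.List.pyGetD cow 1 0 < 999 then PySem.List.pyGetD cow 1 0 else 999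
  if lo ≤ hi then
    let e1 := events.insert lo (events.getD lo 0 + PySem.List.pyGetD cow 2 0)
    e1.insert (hi + 1) (e1.getD (hi + 1) 0 - PySem.List.pyGetD cow 2 0)
  else events

def getMinBuckets_alt (cows : List (List Int)) : Int :=
  let events := cows.foldl bBuild PySem.Dict.empty
  ((PySem.List.pyRange 1 1000 1).foldl (fun (st : Int × Int) i =>
    let cur := st.2 + events.getD i 0
    (if cur > st.1 then cur else st.1, cur)) (0, 0)).1

-- ===== PRECONDITION & SPEC =====
-- Pre_ excludes the inputs on which the Python A raises IndexError (a cow with fewer than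
-- three entries whose interval meets 1..999, or no second endpoint while its start is ≤ 999),
-- and the corner where a one-entry cow starts after 999 so A's short-circuit chained
-- comparison never reaches the missing entries and A returns while B itself raises there.
def Pre_getMinBuckets (cows : List (List Int)) : Prop := ∀ cow ∈ cows, 3 ≤ cow.length ∨
  (cow.length = 2 ∧
    (if PySem.List.pyGetD cow 0 0 > 1 then PySem.List.pyGetD cow 0 0 else 1) >
    (if PySem.List.pyGetD cow 1 0 < 999 then PySem.List.pyGetD cow 1 0 else 999))
instance (cows : List (List Int)) : Decidable (Pre_getMinBuckets cows) := by unfold Pre_getMinBuckets; infer_instance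
def pvWitness_getMinBuckets : List (List Int) := [[1, 5, 2], [3, 4, 1]]

def Spec_getMinBuckets (cows : List (List Int)) (out : Int) : Prop := out = getMinBuckets_alt cows
instance (cows : List (List Int)) (out : Int) : Decidable (Spec_getMinBuckets cows out) := by unfold Spec_getMinBuckets; infer_instance

-- ===== CLAIM (what is proved, stated in full; the proofs are below) =====
def Claim_equal_getMinBuckets : Prop := ∀ (cows : List (List Int)), Dom_getMinBuckets cows → Pre_getMinBuckets cows → Spec_getMinBuckets cows (getMinBuckets cows)

-- ===== LEMMAS AND PROOFS =====

-- abbreviations for a cow's fields and its clamped endpoints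
def cwS (cow : List Int) : Int := PySem.List.pyGetD cow 0 0
def cwE (cow : List Int) : Int := PySem.List.pyGetD cow 1 0
def cwW (cow : List Int) : Int := PySem.List.pyGetD cow 2 0
def cwLo (cow : List Int) : Int := if cwS cow > 1 then cwS cow else 1
def cwHi (cow : List Int) : Int := if cwE cow < 999 then cwE cow else 999

-- one cow's contribution to the event dictionary at key k
def evAt (k : Int) (cow : List Int) : Int :=
  if cwLo cow ≤ cwHi cow then
    (if k = cwLo cow then cwW cow else 0) + (if k = cwHi cow + 1 then -cwW cow else 0)
  else 0

-- one cow's contribution to A's inner sum at time i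
def gAt (i : Int) (cow : List Int) : Int :=
  if cwS cow ≤ i ∧ i ≤ cwE cow then cwW cow else 0

-- prefix sums of one cow's events, and of the whole dictionary
def cumEv (cow : List Int) : Nat → Int
  | 0 => 0
  | n + 1 => cumEv cow n + evAt (1 + n) cow

def psum (cows : List (List Int)) : Nat → Int
  | 0 => 0
  | n + 1 => psum cows n + (cows.map (evAt (1 + n))).sum

lemma cwLo_ge_one (cow : List Int) : 1 ≤ cwLo cow := by
  unfold cwLo; split <;> omega

lemma two_insert_getD (d : PySem.Dict Int Int) (lo hi w k : Int) (h : lo ≤ hi) :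
    ((d.insert lo (d.getD lo 0 + w)).insert (hi + 1)
        ((d.insert lo (d.getD lo 0 + w)).getD (hi + 1) 0 - w)).getD k 0
      = d.getD k 0 + ((if k = lo then w else 0) + (if k = hi + 1 then -w else 0)) := by
  simp only [PySem.Dict.getD_insert]
  split_ifs <;> first | omega | (subst_vars; omega)

lemma dict_getD (cows : List (List Int)) (d : PySem.Dict Int Int) (k : Int) :
    (cows.foldl bBuild d).getD k 0 = d.getD k 0 + (cows.map (evAt k)).sum := by
  induction cows generalizing d with
  | nil => simp
  | cons c cs ih =>
    simp only [List.foldl_cons, List.map_cons, List.sum_cons, ih]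
    have hb : (bBuild d c).getD k 0 = d.getD k 0 + evAt k c := by
      simp only [bBuild]
      rw [show (if PySem.List.pyGetD c 0 0 > 1 then PySem.List.pyGetD c 0 0 else 1) = cwLo c from rfl]
      rw [show (if PySem.List.pyGetD c 1 0 < 999 then PySem.List.pyGetD c 1 0 else 999) = cwHi c from rfl]
      rw [show PySem.List.pyGetD c 2 0 = cwW c from rfl]
      by_cases h : cwLo c ≤ cwHi c
      · simp only [evAt, h]
        exact two_insert_getD d (cwLo c) (cwHi c) (cwW c) k h
      · simp [h, evAt]
    rw [hb]; ring

lemma cumEv_closed (cow : List Int) (n : Nat) :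
    cumEv cow n = if cwLo cow ≤ cwHi cow then
      (if cwLo cow ≤ (n : Int) then cwW cow else 0) +
      (if cwHi cow + 1 ≤ (n : Int) then -cwW cow else 0) else 0 := by
  have h1 := cwLo_ge_one cow
  induction n with
  | zero =>
    simp only [cumEv, Nat.cast_zero]
    split_ifs <;> omega
  | succ n ih =>
    simp only [cumEv, ih, evAt]
    split_ifs <;> push_cast at * <;> omega

lemma cumEv_eq_gAt (cow : List Int) (n : Nat) (h1 : 1 ≤ n) (h2 : n ≤ 999) :
    cumEv cow n = gAt (n : Int) cow := by
  rw [cumEv_closed]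
  unfold gAt cwLo cwHi cwS cwE
  split_ifs <;> omega

lemma psum_eq_sum_cumEv (cows : List (List Int)) (n : Nat) :
    psum cows n = (cows.map (fun c => cumEv c n)).sum := by
  induction n with
  | zero => simp [psum, cumEv]
  | succ n ih =>
    simp only [psum, ih, cumEv]
    rw [← PySem.List.sum_map_add_int]

lemma psum_eq_msum (cows : List (List Int)) (n : Nat) (h1 : 1 ≤ n) (h2 : n ≤ 999) :
    psum cows n = (cows.map (gAt (n : Int))).sum := by
  rw [psum_eq_sum_cumEv]
  exact congrArg List.sum (List.map_congr_left (fun c _ => cumEv_eq_gAt c n h1 h2))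

lemma inner_eq_sum (cows : List (List Int)) (i : Int) :
    aInner cows i = (cows.map (gAt i)).sum := by
  unfold aInner
  have key : ∀ (l : List (List Int)) (a : Int),
      l.foldl (fun cur cow =>
        if PySem.List.pyGetD cow 0 0 ≤ i ∧ i ≤ PySem.List.pyGetD cow 1 0 then
          cur + PySem.List.pyGetD cow 2 0 else cur) a = a + (l.map (gAt i)).sum := by
    intro l
    induction l with
    | nil => simp
    | cons c cs ih =>
      intro a
      simp only [List.foldl_cons, List.map_cons, List.sum_cons, ih, gAt, cwS, cwE, cwW]
      split_ifs <;> ring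
  simpa using key cows 0

lemma inner_sorted (cows : List (List Int)) (i : Int) :
    aInner (PySem.List.sorted cows (fun x => x) false) i = (cows.map (gAt i)).sum := by
  rw [inner_eq_sum]
  exact List.Perm.sum_eq ((PySem.List.sorted_perm cows (fun x => x) false).map (gAt i))

-- the two range folds agree: B carries (most, running prefix sum), A recomputes the sum
lemma fold_eq (cows : List (List Int)) (events : PySem.Dict Int Int)
    (hev : ∀ k : Int, events.getD k 0 = (cows.map (evAt k)).sum) :
    ∀ n : Nat, n ≤ 999 → ∀ m : Int,
    (List.range n).foldl (fun (st : Int × Int) (k : Nat) =>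
        (if st.2 + events.getD (1 + (k : Int)) 0 > st.1 then st.2 + events.getD (1 + (k : Int)) 0
         else st.1, st.2 + events.getD (1 + (k : Int)) 0)) (m, 0) =
      ((List.range n).foldl (fun (most : Int) (k : Nat) =>
        if (cows.map (gAt (1 + (k : Int)))).sum > most then (cows.map (gAt (1 + (k : Int)))).sum
        else most) m, psum cows n) := by
  intro n
  induction n with
  | zero => intro _ m; simp [psum]
  | succ n ih =>
    intro hn m
    rw [List.range_succ, List.foldl_append, List.foldl_append, ih (by omega) m]
    simp only [List.foldl_cons, List.foldl_nil, hev]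
    have hcur : psum cows n + (cows.map (evAt (1 + (n : Int)))).sum = psum cows (n + 1) := rfl
    have hmsm : psum cows (n + 1) = (cows.map (gAt (1 + (n : Int)))).sum := by
      rw [psum_eq_msum cows (n + 1) (by omega) (by omega)]
      rw [show ((n + 1 : Nat) : Int) = 1 + (n : Int) by push_cast; ring]
    rw [hcur, hmsm]

-- ===== VERDICT (by name: the statement is the Claim_ definition above) =====
theorem getMinBuckets_spec : Claim_equal_getMinBuckets := by
  intro cows _ _
  unfold Spec_getMinBuckets getMinBuckets getMinBuckets_alt
  simp only [inner_sorted, PySem.List.pyRange_one]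
  rw [show ((1000 : Int) - 1).toNat = 999 from rfl]
  simp only [List.foldl_map]
  have hev : ∀ k : Int, (cows.foldl bBuild PySem.Dict.empty).getD k 0 = (cows.map (evAt k)).sum := by
    intro k; rw [dict_getD]; simp
  rw [fold_eq cows _ hev 999 (by omega) 0]
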